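-- pv_equiv track=rewrite | github.com/sveee/advent-of-code | advent_of_code/2025/python/11.py | dfs
-- ===== SOURCE A (Python) =====
-- def dfs(node, graph, memo):
--     if node in memo:
--         return memo[node]
--
--     if node not in graph or not graph[node]:
--         return 1
--
--     total = 0
--     for next_node in graph[node]:
--         total += dfs(next_node, graph, memo)
--     memo[node] = total
--     return total
-- ===== SOURCE B (Python) =====
-- def dfs(node, graph, memo):
--     if node in memo:
--         return memo[node]
--     if not graph.get(node):
--         return 1
--     stack = [(node, True)]
--     while stack:
--         n, expand = stack.pop()
--         if expand:
--             if n in memo or not graph.get(n):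
--                 continue
--             stack.append((n, False))
--             for c in reversed(graph[n]):
--                 stack.append((c, True))
--         else:
--             memo[n] = sum(memo[c] if c in memo else 1 for c in graph[n])
--     return memo[node]
-- ===== Notes on version B (the rewrite author's own statement) =====
-- stated objective: alternative
-- what changed: Replaces A's recursive memoized DFS with an iterative two-phase (post-order) explicit-stack DFS: children are expanded first, and when a node's marker is popped its total is recomputed as the sum of memo[c]-or-1 over its children; memo receives exactly the same keys and values in the same order, and deep graphs no longer hit Python's recursion limit.
import Mathlib
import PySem

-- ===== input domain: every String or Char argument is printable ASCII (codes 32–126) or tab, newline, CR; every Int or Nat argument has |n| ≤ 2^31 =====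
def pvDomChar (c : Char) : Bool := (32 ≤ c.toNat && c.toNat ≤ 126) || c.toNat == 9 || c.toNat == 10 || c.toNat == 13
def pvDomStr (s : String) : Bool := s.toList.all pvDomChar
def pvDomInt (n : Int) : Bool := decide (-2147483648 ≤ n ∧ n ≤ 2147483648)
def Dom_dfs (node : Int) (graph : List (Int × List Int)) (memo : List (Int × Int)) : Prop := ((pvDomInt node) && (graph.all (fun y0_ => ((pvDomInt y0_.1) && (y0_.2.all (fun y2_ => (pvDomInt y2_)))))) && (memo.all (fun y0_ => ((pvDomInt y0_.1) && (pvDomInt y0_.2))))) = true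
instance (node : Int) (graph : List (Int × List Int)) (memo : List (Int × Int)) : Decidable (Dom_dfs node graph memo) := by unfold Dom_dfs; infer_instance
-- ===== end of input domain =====

-- B replaces A's recursive memoized DFS by an iterative two-phase (post-order) explicit-stack DFS
-- (alternative decomposition, same asymptotic cost). Both Pythons mutate `memo` identically
-- (same keys, values and insertion order); the equivalence proved here is about the RETURN value.

-- ===== PORT A =====
-- Recursion fuel `graph.length + 1` bounds A's recursion depth; under Pre_dfs (no memo-free
-- cycle reachable from `node`) it is never exhausted, so the guard only makes the
-- transliteration total.
mutual
def dfsA : Nat → Int → List (Int × List Int) → PySem.Dict Int Int → Option (Int × PySem.Dict Int Int)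
  | 0, _, _, _ => none
  | f+1, n, g, m =>
    match m.get? n with
    | some v => some (v, m)                       -- if node in memo: return memo[node]
    | none =>
      match (PySem.Dict.mk g).get? n with
      | none => some (1, m)                       -- node not in graph
      | some ch =>
        if ch = [] then some (1, m)               -- not graph[node]
        else
          match dfsAList f ch g m with            -- total = 0; for next_node in graph[node]: total += dfs(next_node, graph, memo)
          | none => none
          | some (t, m1) => some (t, m1.insert n t)   -- memo[node] = total; return total
  termination_by f _ _ _ => (f, 0)

def dfsAList : Nat → List Int → List (Int × List Int) → PySem.Dict Int Int → Option (Int × PySem.Dict Int Int)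
  | _, [], _, m => some (0, m)
  | f, c :: cs, g, m =>
    match dfsA f c g m with
    | none => none
    | some (v, m1) =>
      match dfsAList f cs g m1 with
      | none => none
      | some (t, m2) => some (v + t, m2)
  termination_by f cs _ _ => (f, cs.length + 1)
end

def dfs (node : Int) (graph : List (Int × List Int)) (memo : List (Int × Int)) : Int :=
  match dfsA (graph.length + 1) node graph (PySem.Dict.mk memo) with
  | some (v, _) => v
  | none => 0

-- ===== PORT B =====
-- graph.get(x) or [] (also used by Pre_dfs below)
def childrenD (g : List (Int × List Int)) (x : Int) : List Int := (PySem.Dict.mk g).getD x []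

-- sum(memo[c] if c in memo else 1 for c in ch)
def sumChildren (m : PySem.Dict Int Int) (ch : List Int) : Int :=
  ch.foldl (fun acc c => acc + m.getD c 1) 0

def maxCh (g : List (Int × List Int)) : Nat := g.foldl (fun a p => max a p.2.length) 0

-- the `while stack:` loop; fuel is only a totality guard (Python B's loop terminates on every
-- input admitted by Pre_dfs; the bound 1 + |graph|*(maxCh+1) is proved sufficient below)
def loopB : Nat → List (Int × Bool) → List (Int × List Int) → PySem.Dict Int Int → Option (PySem.Dict Int Int)
  | _, [], _, m => some m
  | 0, _ :: _, _, _ => none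
  | f+1, (n, phase) :: rest, g, m =>
    if phase then
      if (m.get? n).isSome then loopB f rest g m          -- if n in memo: continue
      else
        match (PySem.Dict.mk g).get? n with
        | none => loopB f rest g m                        -- not graph.get(n): continue
        | some ch =>
          if ch = [] then loopB f rest g m
          else loopB f (ch.map (fun c => (c, true)) ++ (n, false) :: rest) g m
            -- push (n, False), then children reversed; top-first list representation
    else
      -- memo[n] = sum(memo[c] if c in memo else 1 for c in graph[n]); n is always a graph key here
      loopB f rest g (m.insert n (sumChildren m (childrenD g n)))

def dfs_alt (node : Int) (graph : List (Int × List Int)) (memo : List (Int × Int)) : Int :=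
  match (PySem.Dict.mk memo).get? node with
  | some v => v                                           -- if node in memo: return memo[node]
  | none =>
    match (PySem.Dict.mk graph).get? node with
    | none => 1                                           -- if not graph.get(node): return 1
    | some ch =>
      if ch = [] then 1
      else
        match loopB (1 + graph.length * (maxCh graph + 1)) [(node, true)] graph (PySem.Dict.mk memo) with
        | some m' => m'.getD node 0                       -- return memo[node] (always present here)
        | none => 0

-- ===== PRECONDITION & SPEC =====
-- reachability tester: is there a path of length 1..f from a to b every vertex of which
-- (after a) is absent from the initial memo? (memo entries cut A's recursion)
def reachB (g : List (Int × List Int)) (m0 : PySem.Dict Int Int) : Nat → Int → Int → Bool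
  | 0, _, _ => false
  | f+1, a, b => (childrenD g a).any (fun c => (m0.get? c).isNone && (c == b || reachB g m0 f c b))

-- Pre_dfs excludes exactly the inputs on which a directed cycle through memo-free vertices
-- passes through `node` or is reachable from `node`: on those inputs Python A raises
-- RecursionError (and Python B's loop does not terminate); everywhere else A returns normally.
def Pre_dfs (node : Int) (graph : List (Int × List Int)) (memo : List (Int × Int)) : Prop :=
  (PySem.Dict.mk memo).get? node = none → ∀ p ∈ graph, (PySem.Dict.mk memo).get? p.1 = none →
    (p.1 = node ∨ reachB graph (PySem.Dict.mk memo) (graph.length + 1) node p.1 = true) →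
    reachB graph (PySem.Dict.mk memo) (graph.length + 1) p.1 p.1 = false
instance (node : Int) (graph : List (Int × List Int)) (memo : List (Int × Int)) : Decidable (Pre_dfs node graph memo) := by unfold Pre_dfs; infer_instance

def pvWitness_dfs : Int × (List (Int × List Int)) × (List (Int × Int)) :=
  (1, [(1, [2, 3]), (2, [3])], [(5, 7)])

def Spec_dfs (node : Int) (graph : List (Int × List Int)) (memo : List (Int × Int)) (out : Int) : Prop := out = dfs_alt node graph memo
instance (node : Int) (graph : List (Int × List Int)) (memo : List (Int × Int)) (out : Int) : Decidable (Spec_dfs node graph memo out) := by unfold Spec_dfs; infer_instance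

-- ===== CLAIM (what is proved, stated in full; the proofs are below) =====
def Claim_equal_dfs : Prop := ∀ (node : Int) (graph : List (Int × List Int)) (memo : List (Int × Int)), Dom_dfs node graph memo → Pre_dfs node graph memo → Spec_dfs node graph memo (dfs node graph memo)

-- ===== LEMMAS AND PROOFS =====

-- paths in the graph through memo-free vertices, by length
def HasPath (g : List (Int × List Int)) (m0 : PySem.Dict Int Int) : Nat → Int → Int → Prop
  | 0, a, b => a = b
  | L+1, a, b => ∃ c, c ∈ childrenD g a ∧ m0.get? c = none ∧ HasPath g m0 L c b

-- memo evolution: every lookup of m survives into M, and keys fresh in m stay fresh in M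
-- unless they are expandable graph keys
def MemoExt (g : List (Int × List Int)) (m M : PySem.Dict Int Int) : Prop :=
  (∀ x w, m.get? x = some w → M.get? x = some w) ∧
  (∀ x, m.get? x = none → childrenD g x ≠ [] ∨ M.get? x = none)

theorem memoExt_refl (g : List (Int × List Int)) (m : PySem.Dict Int Int) : MemoExt g m m := by
  constructor
  · intro x w h; exact h
  · intro x h; exact Or.inr h

theorem hasPath_snoc (g : List (Int × List Int)) (m0 : PySem.Dict Int Int) :
    ∀ (L : Nat) (a b c : Int), HasPath g m0 L a b → c ∈ childrenD g b →
      m0.get? c = none → HasPath g m0 (L+1) a c := by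
  intro L
  induction L with
  | zero =>
    intro a b c h hc hc0
    simp only [HasPath] at h
    subst h
    exact ⟨c, hc, hc0, rfl⟩
  | succ L ih =>
    intro a b c h hc hc0
    obtain ⟨d, hd, hd0, hp⟩ := h
    exact ⟨d, hd, hd0, ih d b c hp hc hc0⟩

theorem reachB_of_hasPath (g : List (Int × List Int)) (m0 : PySem.Dict Int Int) :
    ∀ (L f : Nat) (a b : Int), HasPath g m0 (L+1) a b → L + 1 ≤ f → reachB g m0 f a b = true := by
  intro L
  induction L with
  | zero =>
    intro f a b h hf
    obtain ⟨c, hc, hc0, hcb⟩ := h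
    simp only [HasPath] at hcb
    subst hcb
    match f, hf with
    | f'+1, _ =>
      simp only [reachB, List.any_eq_true]
      exact ⟨c, hc, by simp [hc0]⟩
  | succ L ih =>
    intro f a b h hf
    obtain ⟨c, hc, hc0, hp⟩ := h
    match f, hf with
    | f'+1, hf =>
      simp only [reachB, List.any_eq_true]
      refine ⟨c, hc, ?_⟩
      have := ih f' c b hp (by omega)
      simp [this, hc0]

theorem foldl_max_init_le :
    ∀ (l : List (Int × List Int)) (a : Nat), a ≤ l.foldl (fun a q => max a q.2.length) a := by
  intro l
  induction l with
  | nil => intro a; exact Nat.le_refl a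
  | cons q l ih =>
    intro a
    exact Nat.le_trans (Nat.le_max_left a q.2.length) (ih _)

theorem mem_len_le_maxCh (g : List (Int × List Int)) (p : Int × List Int) (hp : p ∈ g) :
    p.2.length ≤ maxCh g := by
  suffices h : ∀ (l : List (Int × List Int)) (a : Nat), p ∈ l →
      p.2.length ≤ l.foldl (fun a q => max a q.2.length) a by
    exact h g 0 hp
  intro l
  induction l with
  | nil => intro a h; cases h
  | cons q l ih =>
    intro a h
    rcases List.mem_cons.mp h with h | h
    · subst h
      exact Nat.le_trans (Nat.le_max_right a p.2.length) (foldl_max_init_le l _)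
    · exact ih _ h

theorem get?_mk_append {ν : Type} (l1 l2 : List (Int × ν)) (x : Int) :
    (PySem.Dict.mk (l1 ++ l2)).get? x =
      (match (PySem.Dict.mk l1).get? x with
       | some v => some v
       | none => (PySem.Dict.mk l2).get? x) := by
  induction l1 with
  | nil => rfl
  | cons p l1 ih =>
    rcases p with ⟨k, v⟩
    rw [List.cons_append, PySem.Dict.get?_mk_cons, PySem.Dict.get?_mk_cons]
    by_cases hk : k == x
    · simp [hk]
    · simp only [Bool.not_eq_true] at hk
      simp [hk, ih]

theorem get?_mk_none_of_not_mem {ν : Type} (l : List (Int × ν)) (x : Int)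
    (h : x ∉ l.map Prod.fst) : (PySem.Dict.mk l).get? x = none := by
  induction l with
  | nil => rfl
  | cons p l ih =>
    rcases p with ⟨k, v⟩
    rw [PySem.Dict.get?_mk_cons]
    simp only [List.map_cons, List.mem_cons, not_or] at h
    have hk : (k == x) = false := by
      simp only [beq_eq_false_iff_ne]
      exact fun hkx => h.1 hkx.symm
    simp [hk]
    exact ih h.2

theorem get?_mk_ne_none_of_mem {ν : Type} (l : List (Int × ν)) (x : Int)
    (h : x ∈ l.map Prod.fst) : (PySem.Dict.mk l).get? x ≠ none := by
  induction l with
  | nil => cases h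
  | cons p l ih =>
    rcases p with ⟨k, v⟩
    rw [PySem.Dict.get?_mk_cons]
    by_cases hk : k == x
    · simp [hk]
    · simp only [Bool.not_eq_true] at hk
      simp only [List.map_cons, List.mem_cons] at h
      rcases h with h | h
      · exact absurd (by simp [h] : (k == x) = true) (by simp [hk])
      · simp [hk]
        exact ih h

theorem filter_length_drop (l : List Int) (hl : l.Nodup) (n : Int) (P : List Int)
    (hn : n ∈ l) (hnP : n ∉ P) :
    (l.filter (fun k => decide (k ∉ P ++ [n]))).length < (l.filter (fun k => decide (k ∉ P))).length := by
  induction l with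
  | nil => cases hn
  | cons x l ih =>
    have hl' : l.Nodup := (List.nodup_cons.mp hl).2
    by_cases hx : x = n
    · subst hx
      have h1 : (decide (x ∉ P ++ [x])) = false := by simp
      have h2 : (decide (x ∉ P)) = true := by simp [hnP]
      simp only [List.filter_cons, h1, h2, Bool.false_eq_true, if_false, if_true, List.length_cons]
      have hsub : List.Sublist (l.filter (fun k => decide (k ∉ P ++ [x]))) (l.filter (fun k => decide (k ∉ P))) := by
        apply List.monotone_filter_right
        intro a ha
        simp only [decide_eq_true_eq] at ha ⊢
        intro hmem
        exact ha (List.mem_append_left _ hmem)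
      have := hsub.length_le
      omega
    · have hn' : n ∈ l := by
        rcases List.mem_cons.mp hn with h | h
        · exact absurd h.symm hx
        · exact h
      have heq : (decide (x ∉ P ++ [n])) = (decide (x ∉ P)) := by
        by_cases hxP : x ∈ P
        · simp [hxP]
        · simp [hxP, hx]
      have ihl := ih hl' hn'
      simp only [List.filter_cons, heq]
      by_cases hxP2 : (decide (x ∉ P)) = true
      · simp only [hxP2, if_true, List.length_cons]
        omega
      · simp only [Bool.not_eq_true] at hxP2
        simp only [hxP2, Bool.false_eq_true, if_false]
        omega

theorem sumChildren_cons (m : PySem.Dict Int Int) (c : Int) (cs : List Int) :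
    sumChildren m (c :: cs) = m.getD c 1 + sumChildren m cs := by
  simp [sumChildren, PySem.List.foldl_add]

-- loopB step equations
theorem loopB_nil (f : Nat) (g : List (Int × List Int)) (m : PySem.Dict Int Int) :
    loopB f [] g m = some m := by cases f <;> rfl

theorem loopB_true_cached (f : Nat) (n : Int) (rest : List (Int × Bool)) (g : List (Int × List Int))
    (m : PySem.Dict Int Int) (h : (m.get? n).isSome) :
    loopB (f+1) ((n, true) :: rest) g m = loopB f rest g m := by
  simp [loopB, h]

theorem loopB_true_nokey (f : Nat) (n : Int) (rest : List (Int × Bool)) (g : List (Int × List Int))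
    (m : PySem.Dict Int Int) (h1 : m.get? n = none) (h2 : (PySem.Dict.mk g).get? n = none) :
    loopB (f+1) ((n, true) :: rest) g m = loopB f rest g m := by
  simp [loopB, h1, h2]

theorem loopB_true_leaf (f : Nat) (n : Int) (rest : List (Int × Bool)) (g : List (Int × List Int))
    (m : PySem.Dict Int Int) (h1 : m.get? n = none) (h2 : (PySem.Dict.mk g).get? n = some []) :
    loopB (f+1) ((n, true) :: rest) g m = loopB f rest g m := by
  simp [loopB, h1, h2]

theorem loopB_true_expand (f : Nat) (n : Int) (rest : List (Int × Bool)) (g : List (Int × List Int))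
    (m : PySem.Dict Int Int) (ch : List Int) (h1 : m.get? n = none)
    (h2 : (PySem.Dict.mk g).get? n = some ch) (h3 : ch ≠ []) :
    loopB (f+1) ((n, true) :: rest) g m
      = loopB f (ch.map (fun c => (c, true)) ++ (n, false) :: rest) g m := by
  simp [loopB, h1, h2, h3]

theorem loopB_false (f : Nat) (n : Int) (rest : List (Int × Bool)) (g : List (Int × List Int))
    (m : PySem.Dict Int Int) :
    loopB (f+1) ((n, false) :: rest) g m
      = loopB f rest g (m.insert n (sumChildren m (childrenD g n))) := by
  simp [loopB]

theorem get?_items_append {ν : Type} (m m' : PySem.Dict Int ν) (ws : List (Int × ν))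
    (h : m'.items = m.items ++ ws) (x : Int) :
    m'.get? x = (match m.get? x with | some v => some v | none => (PySem.Dict.mk ws).get? x) := by
  have hm' : m' = PySem.Dict.mk (m.items ++ ws) := by
    apply PySem.Dict.ext; exact h
  have hmm : PySem.Dict.mk m.items = m := rfl
  rw [hm', get?_mk_append, hmm]

theorem get?_extend {ν : Type} (m m' : PySem.Dict Int ν) (ws : List (Int × ν))
    (h : m'.items = m.items ++ ws) (x : Int) (w : ν) (hx : m.get? x = some w) :
    m'.get? x = some w := by
  rw [get?_items_append m m' ws h x, hx]

theorem memoExt_trans (g : List (Int × List Int)) (a b c : PySem.Dict Int Int)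
    (h1 : MemoExt g a b) (h2 : MemoExt g b c) : MemoExt g a c := by
  constructor
  · intro x w h; exact h2.1 x w (h1.1 x w h)
  · intro x h
    rcases h1.2 x h with hc | hb
    · exact Or.inl hc
    · rcases h2.2 x hb with hc | hcn
      · exact Or.inl hc
      · exact Or.inr hcn

theorem memoExt_of_append (g : List (Int × List Int)) (m m' : PySem.Dict Int Int)
    (ws : List (Int × Int)) (h : m'.items = m.items ++ ws)
    (hp : ∀ p ∈ ws, childrenD g p.1 ≠ []) : MemoExt g m m' := by
  constructor
  · intro x w hx; exact get?_extend m m' ws h x w hx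
  · intro x hx
    cases hx' : m'.get? x with
    | none => exact Or.inr rfl
    | some w =>
      rw [get?_items_append m m' ws h x, hx] at hx'
      change (PySem.Dict.mk ws).get? x = some w at hx'
      have hmem : (x, w) ∈ ws := PySem.Dict.mem_items_of_get?_eq_some _ hx'
      exact Or.inl (hp (x, w) hmem)

-- the joint invariant: when no memo-free cycle touches a vertex reachable from `root`,
-- A's recursion succeeds, its memo writes are an append of fresh expandable keys,
-- and B's machine simulates it step-exactly
def PsimA (g : List (Int × List Int)) (m0 : PySem.Dict Int Int) (root : Int) (f : Nat) : Prop :=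
  ∀ (n : Int) (m : PySem.Dict Int Int) (P : List Int),
    (∀ x w, m0.get? x = some w → m.get? x = some w) →
    P.Nodup → (∀ p ∈ P, p ∈ g.map Prod.fst) →
    (m0.get? n = none → ∀ p ∈ P, ∃ L, 1 ≤ L ∧ L ≤ P.length ∧ HasPath g m0 L p n) →
    (m0.get? n = none → n = root ∨ (m0.get? root = none ∧ ∃ L, 1 ≤ L ∧ L ≤ P.length ∧ HasPath g m0 L root n)) →
    ((g.map Prod.fst).dedup.filter (fun k => decide (k ∉ P))).length < f →
    ∃ v m', dfsA f n g m = some (v, m') ∧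
      (∃ ws : List (Int × Int),
        m'.items = m.items ++ ws ∧
        (∀ p ∈ ws, p.1 ∈ g.map Prod.fst ∧ childrenD g p.1 ≠ [] ∧ m.get? p.1 = none ∧ p.1 ∉ P) ∧
        (ws.map Prod.fst).Nodup ∧
        (∃ k, k ≤ 1 + ws.length * (maxCh g + 1) ∧
          ∀ (f2 : Nat) (rest : List (Int × Bool)),
            loopB (k + f2) ((n, true) :: rest) g m = loopB f2 rest g m')) ∧
      (∀ M, MemoExt g m' M → M.getD n 1 = v) ∧
      (m.get? n = none → childrenD g n ≠ [] → m'.get? n = some v)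

def PsimL (g : List (Int × List Int)) (m0 : PySem.Dict Int Int) (root : Int) (f : Nat) : Prop :=
  ∀ (cs : List Int) (m : PySem.Dict Int Int) (P : List Int),
    (∀ x w, m0.get? x = some w → m.get? x = some w) →
    P.Nodup → (∀ p ∈ P, p ∈ g.map Prod.fst) →
    (∀ c ∈ cs, m0.get? c = none → ∀ p ∈ P, ∃ L, 1 ≤ L ∧ L ≤ P.length ∧ HasPath g m0 L p c) →
    (∀ c ∈ cs, m0.get? c = none → c = root ∨ (m0.get? root = none ∧ ∃ L, 1 ≤ L ∧ L ≤ P.length ∧ HasPath g m0 L root c)) →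
    ((g.map Prod.fst).dedup.filter (fun k => decide (k ∉ P))).length < f →
    ∃ t m', dfsAList f cs g m = some (t, m') ∧
      (∃ ws : List (Int × Int),
        m'.items = m.items ++ ws ∧
        (∀ p ∈ ws, p.1 ∈ g.map Prod.fst ∧ childrenD g p.1 ≠ [] ∧ m.get? p.1 = none ∧ p.1 ∉ P) ∧
        (ws.map Prod.fst).Nodup ∧
        (∃ k, k ≤ cs.length + ws.length * (maxCh g + 1) ∧
          ∀ (f2 : Nat) (rest : List (Int × Bool)),
            loopB (k + f2) (cs.map (fun c => (c, true)) ++ rest) g m = loopB f2 rest g m')) ∧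
      (∀ M, MemoExt g m' M → sumChildren M cs = t)

theorem mega (g : List (Int × List Int)) (m0 : PySem.Dict Int Int) (root : Int)
    (hacyc : m0.get? root = none → ∀ p ∈ g, m0.get? p.1 = none →
      (p.1 = root ∨ reachB g m0 (g.length + 1) root p.1 = true) →
      reachB g m0 (g.length + 1) p.1 p.1 = false) :
    ∀ f, PsimA g m0 root f ∧ PsimL g m0 root f := by
  intro f
  induction f with
  | zero =>
    constructor
    · intro n m P _ _ _ _ _ hf; exact absurd hf (Nat.not_lt_zero _)
    · intro cs m P _ _ _ _ _ hf; exact absurd hf (Nat.not_lt_zero _)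
  | succ f ih =>
    obtain ⟨_, ihL⟩ := ih
    have hA : PsimA g m0 root (f+1) := by
      intro n m P hsub hnd hPk hPpath hroot hf
      cases hmn : m.get? n with
      | some v =>
        refine ⟨v, m, ?_, ⟨[], by simp, by simp, by simp, 1, by simp, ?_⟩, ?_, ?_⟩
        · simp [dfsA, hmn]
        · intro f2 rest
          have e : 1 + f2 = f2 + 1 := by omega
          rw [e, loopB_true_cached f2 n rest g m (by simp [hmn])]
        · intro M hM
          exact PySem.Dict.getD_of_get?_eq_some M 1 (hM.1 n v hmn)
        · intro h; simp at h
      | none =>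
        cases hgn : (PySem.Dict.mk g).get? n with
        | none =>
          have hch : childrenD g n = [] := by
            simp [childrenD, PySem.Dict.getD_eq_get?_getD, hgn]
          refine ⟨1, m, ?_, ⟨[], by simp, by simp, by simp, 1, by simp, ?_⟩, ?_, ?_⟩
          · simp [dfsA, hmn, hgn]
          · intro f2 rest
            have e : 1 + f2 = f2 + 1 := by omega
            rw [e, loopB_true_nokey f2 n rest g m hmn hgn]
          · intro M hM
            rcases hM.2 n hmn with h | h
            · exact absurd hch h
            · exact PySem.Dict.getD_of_get?_eq_none M 1 h
          · intro _ hcontra; exact absurd hch hcontra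
        | some ch =>
          by_cases hch : ch = []
          · subst hch
            have hchD : childrenD g n = [] := by
              simp [childrenD, PySem.Dict.getD_eq_get?_getD, hgn]
            refine ⟨1, m, ?_, ⟨[], by simp, by simp, by simp, 1, by simp, ?_⟩, ?_, ?_⟩
            · simp [dfsA, hmn, hgn]
            · intro f2 rest
              have e : 1 + f2 = f2 + 1 := by omega
              rw [e, loopB_true_leaf f2 n rest g m hmn hgn]
            · intro M hM
              rcases hM.2 n hmn with h | h
              · exact absurd hchD h
              · exact PySem.Dict.getD_of_get?_eq_none M 1 h
            · intro _ hcontra; exact absurd hchD hcontra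
          · -- expand case
            have hmemg : (n, ch) ∈ g := PySem.Dict.mem_items_of_get?_eq_some _ hgn
            have hnk : n ∈ g.map Prod.fst := List.mem_map.mpr ⟨(n, ch), hmemg, rfl⟩
            have hchD : childrenD g n = ch := by
              simp [childrenD, PySem.Dict.getD_eq_get?_getD, hgn]
            have hn0 : m0.get? n = none := by
              cases h0 : m0.get? n with
              | none => rfl
              | some w => rw [hsub n w h0] at hmn; cases hmn
            have hPlen : P.length ≤ g.length := by
              have := (List.subperm_of_subset hnd hPk).length_le
              rw [List.length_map] at this
              exact this
            have hrootfree : m0.get? root = none := by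
              rcases hroot hn0 with h | ⟨h0, _⟩
              · exact h ▸ hn0
              · exact h0
            have hreachroot : n = root ∨ reachB g m0 (g.length + 1) root n = true := by
              rcases hroot hn0 with h | ⟨h0, L, hL1, hL2, hp⟩
              · exact Or.inl h
              · right
                obtain ⟨L', rfl⟩ : ∃ L', L = L' + 1 := ⟨L - 1, by omega⟩
                exact reachB_of_hasPath g m0 L' (g.length + 1) root n hp (by omega)
            have hnP : n ∉ P := by
              intro hmem
              obtain ⟨L, hL1, hL2, hpath⟩ := hPpath hn0 n hmem
              obtain ⟨L', rfl⟩ : ∃ L', L = L' + 1 := ⟨L - 1, by omega⟩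
              have hreach : reachB g m0 (g.length + 1) n n = true :=
                reachB_of_hasPath g m0 L' (g.length + 1) n n hpath (by omega)
              have hfalse := hacyc hrootfree (n, ch) hmemg hn0 hreachroot
              simp only at hfalse
              rw [hfalse] at hreach; cases hreach
            have hnd' : (P ++ [n]).Nodup := by
              rw [List.nodup_append]
              refine ⟨hnd, List.nodup_singleton n, ?_⟩
              intro a ha b hb
              rw [List.mem_singleton.mp hb]
              exact fun h => hnP (h ▸ ha)
            have hPk' : ∀ p ∈ P ++ [n], p ∈ g.map Prod.fst := by
              intro p hp
              rcases List.mem_append.mp hp with hp | hp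
              · exact hPk p hp
              · rw [List.mem_singleton.mp hp]; exact hnk
            have hpath' : ∀ c ∈ ch, m0.get? c = none → ∀ p ∈ P ++ [n],
                ∃ L, 1 ≤ L ∧ L ≤ (P ++ [n]).length ∧ HasPath g m0 L p c := by
              intro c hc hc0 p hp
              rcases List.mem_append.mp hp with hp | hp
              · obtain ⟨L, h1, h2, hpa⟩ := hPpath hn0 p hp
                refine ⟨L + 1, by omega, ?_, hasPath_snoc g m0 L p n c hpa (hchD ▸ hc) hc0⟩
                simp only [List.length_append, List.length_singleton]; omega
              · rw [List.mem_singleton.mp hp]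
                refine ⟨1, le_refl 1, by simp, ⟨c, hchD ▸ hc, hc0, rfl⟩⟩
            have hroot' : ∀ c ∈ ch, m0.get? c = none →
                c = root ∨ (m0.get? root = none ∧
                  ∃ L, 1 ≤ L ∧ L ≤ (P ++ [n]).length ∧ HasPath g m0 L root c) := by
              intro c hc hc0
              right
              rcases hroot hn0 with h | ⟨h0, L, h1, h2, hp⟩
              · subst h
                exact ⟨hn0, 1, le_refl 1, by simp, ⟨c, hchD ▸ hc, hc0, rfl⟩⟩
              · refine ⟨h0, L + 1, by omega, ?_, hasPath_snoc g m0 L root n c hp (hchD ▸ hc) hc0⟩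
                simp only [List.length_append, List.length_singleton]; omega
            have hf' : ((g.map Prod.fst).dedup.filter (fun k => decide (k ∉ P ++ [n]))).length < f := by
              have hdrop := filter_length_drop (g.map Prod.fst).dedup (List.nodup_dedup _) n P
                (List.mem_dedup.mpr hnk) hnP
              omega
            obtain ⟨t, m1, heqL, ⟨ws1, hws1eq, hws1p, hws1nd, k1, hk1, hmach1⟩, hsum1⟩ :=
              ihL ch m (P ++ [n]) hsub hnd' hPk' hpath' hroot' hf'
            have hn_not_ws1 : n ∉ ws1.map Prod.fst := by
              intro hmem
              obtain ⟨p, hp, hp1⟩ := List.mem_map.mp hmem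
              have hpP' : p.1 ∈ P ++ [n] := by rw [hp1]; exact List.mem_append_right P (by simp)
              exact (hws1p p hp).2.2.2 hpP'
            have hm1n : m1.get? n = none := by
              rw [get?_items_append m m1 ws1 hws1eq n, hmn]
              exact get?_mk_none_of_not_mem ws1 n hn_not_ws1
            have hcont : m1.contains n = false := by
              rw [PySem.Dict.contains_eq_isSome_get?, hm1n]; rfl
            have hitems' : (m1.insert n t).items = m1.items ++ [(n, t)] :=
              PySem.Dict.items_insert_of_not_contains m1 t hcont
            refine ⟨t, m1.insert n t, ?_, ⟨ws1 ++ [(n, t)], ?_, ?_, ?_, 1 + k1 + 1, ?_, ?_⟩, ?_, ?_⟩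
            · simp [dfsA, hmn, hgn, hch, heqL]
            · rw [hitems', hws1eq, List.append_assoc]
            · intro p hp
              rcases List.mem_append.mp hp with hp | hp
              · obtain ⟨h1, h2, h3, h4⟩ := hws1p p hp
                exact ⟨h1, h2, h3, fun hpP => h4 (List.mem_append_left _ hpP)⟩
              · rw [List.mem_singleton.mp hp]
                exact ⟨hnk, hchD ▸ hch, hmn, hnP⟩
            · rw [List.map_append, List.nodup_append]
              refine ⟨hws1nd, by simp, ?_⟩
              intro a ha b hb
              simp only [List.map_cons, List.map_nil, List.mem_singleton] at hb
              subst hb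
              exact fun h => hn_not_ws1 (h ▸ ha)
            · have hchlen : ch.length ≤ maxCh g := mem_len_le_maxCh g (n, ch) hmemg
              rw [List.length_append, List.length_singleton, Nat.add_mul, Nat.one_mul]
              omega
            · intro f2 rest
              have e1 : 1 + k1 + 1 + f2 = (k1 + (1 + f2)) + 1 := by omega
              rw [e1, loopB_true_expand _ n rest g m ch hmn hgn hch,
                hmach1 (1 + f2) ((n, false) :: rest)]
              have e2 : 1 + f2 = f2 + 1 := by omega
              rw [e2, loopB_false f2 n rest g m1, hchD,
                hsum1 m1 (memoExt_refl g m1)]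
            · intro M hM
              exact PySem.Dict.getD_of_get?_eq_some M 1
                (hM.1 n t (PySem.Dict.get?_insert_self m1 n t))
            · intro _ _; exact PySem.Dict.get?_insert_self m1 n t
    have hL : PsimL g m0 root (f+1) := by
      intro cs
      induction cs with
      | nil =>
        intro m P _ _ _ _ _ _
        refine ⟨0, m, by simp [dfsAList], ⟨[], by simp, by simp, by simp, 0, by simp, ?_⟩, ?_⟩
        · intro f2 rest; simp
        · intro M _; rfl
      | cons c cs ihcs =>
        intro m P hsub hnd hPk hpath hrootL hf
        obtain ⟨v, m1, heq1, ⟨ws1, hws1eq, hws1p, hws1nd, k1, hk1, hmach1⟩, hval1, -⟩ :=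
          hA c m P hsub hnd hPk (fun hc0 p hp => hpath c List.mem_cons_self hc0 p hp)
            (fun hc0 => hrootL c List.mem_cons_self hc0) hf
        have hsub1 : ∀ x w, m0.get? x = some w → m1.get? x = some w :=
          fun x w hx => get?_extend m m1 ws1 hws1eq x w (hsub x w hx)
        obtain ⟨t, m2, heq2, ⟨ws2, hws2eq, hws2p, hws2nd, k2, hk2, hmach2⟩, hsum2⟩ :=
          ihcs m1 P hsub1 hnd hPk
            (fun c' hc' hc0 p hp => hpath c' (List.mem_cons_of_mem c hc') hc0 p hp)
            (fun c' hc' hc0 => hrootL c' (List.mem_cons_of_mem c hc') hc0) hf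
        have hext1 : MemoExt g m m1 :=
          memoExt_of_append g m m1 ws1 hws1eq (fun p hp => (hws1p p hp).2.1)
        have hext2 : MemoExt g m1 m2 :=
          memoExt_of_append g m1 m2 ws2 hws2eq (fun p hp => (hws2p p hp).2.1)
        have hws2p' : ∀ p ∈ ws2, p.1 ∈ g.map Prod.fst ∧ childrenD g p.1 ≠ [] ∧
            m.get? p.1 = none ∧ p.1 ∉ P := by
          intro p hp
          obtain ⟨h1, h2, h3, h4⟩ := hws2p p hp
          refine ⟨h1, h2, ?_, h4⟩
          cases hx : m.get? p.1 with
          | none => rfl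
          | some w =>
            have := get?_extend m m1 ws1 hws1eq p.1 w hx
            rw [this] at h3; cases h3
        have hdisj : ∀ x ∈ ws1.map Prod.fst, x ∉ ws2.map Prod.fst := by
          intro x h1 h2
          obtain ⟨p, hp, hp1⟩ := List.mem_map.mp h2
          obtain ⟨q, hq, hq1⟩ := List.mem_map.mp h1
          have hm1x : m1.get? x = none := hp1 ▸ (hws2p p hp).2.2.1
          have hmx : m.get? x = none := hq1 ▸ (hws1p q hq).2.2.1
          rw [get?_items_append m m1 ws1 hws1eq x, hmx] at hm1x
          change (PySem.Dict.mk ws1).get? x = none at hm1x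
          exact get?_mk_ne_none_of_mem ws1 x h1 hm1x
        refine ⟨v + t, m2, ?_, ⟨ws1 ++ ws2, ?_, ?_, ?_, k1 + k2, ?_, ?_⟩, ?_⟩
        · simp [dfsAList, heq1, heq2]
        · rw [hws2eq, hws1eq, List.append_assoc]
        · intro p hp
          rcases List.mem_append.mp hp with hp | hp
          · exact hws1p p hp
          · exact hws2p' p hp
        · rw [List.map_append, List.nodup_append]
          refine ⟨hws1nd, hws2nd, ?_⟩
          intro a ha b hb h
          exact hdisj a ha (h ▸ hb)
        · rw [List.length_append, List.length_cons, Nat.add_mul]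
          omega
        · intro f2 rest
          have e : k1 + k2 + f2 = k1 + (k2 + f2) := by omega
          simp only [List.map_cons, List.cons_append]
          rw [e, hmach1 (k2 + f2) (cs.map (fun c => (c, true)) ++ rest), hmach2 f2 rest]
        · intro M hM
          rw [sumChildren_cons, hval1 M (memoExt_trans g m1 m2 M hext2 hM), hsum2 M hM]
    exact ⟨hA, hL⟩

theorem dedup_keys_le (graph : List (Int × List Int)) :
    ((graph.map Prod.fst).dedup.filter (fun k => decide (k ∉ ([] : List Int)))).length
      ≤ graph.length := by
  have h1 : ((graph.map Prod.fst).dedup.filter (fun k => decide (k ∉ ([] : List Int))))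
      = (graph.map Prod.fst).dedup := by
    apply List.filter_eq_self.mpr
    intro a _
    simp
  rw [h1]
  calc (graph.map Prod.fst).dedup.length ≤ (graph.map Prod.fst).length :=
        (List.dedup_sublist _).length_le
    _ = graph.length := List.length_map _
-- ===== VERDICT (by name: the statement is the Claim_ definition above) =====
theorem dfs_spec : Claim_equal_dfs := by
  intro node graph memo _ hPre
  show dfs node graph memo = dfs_alt node graph memo
  have hacyc : (PySem.Dict.mk memo).get? node = none →
      ∀ p ∈ graph, (PySem.Dict.mk memo).get? p.1 = none →
      (p.1 = node ∨ reachB graph (PySem.Dict.mk memo) (graph.length + 1) node p.1 = true) →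
      reachB graph (PySem.Dict.mk memo) (graph.length + 1) p.1 p.1 = false := hPre
  obtain ⟨v, m', heq, ⟨ws, hwseq, hwsp, hwsnd, k, hk, hmach⟩, hval, hthird⟩ :=
    (mega graph (PySem.Dict.mk memo) node hacyc (graph.length + 1)).1 node (PySem.Dict.mk memo) []
      (fun x w h => h) List.nodup_nil (by simp) (by simp) (fun _ => Or.inl rfl)
      (by have := dedup_keys_le graph; omega)
  have hdfs : dfs node graph memo = v := by unfold dfs; rw [heq]
  rw [hdfs]
  unfold dfs_alt
  cases hmn : (PySem.Dict.mk memo).get? node with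
  | some w =>
    simp only [dfsA, hmn] at heq
    simp only [Option.some.injEq, Prod.mk.injEq] at heq
    exact heq.1.symm
  | none =>
    cases hgn : (PySem.Dict.mk graph).get? node with
    | none =>
      simp only [dfsA, hmn, hgn] at heq
      simp only [Option.some.injEq, Prod.mk.injEq] at heq
      exact heq.1.symm
    | some ch =>
      by_cases hch : ch = []
      · subst hch
        simp [dfsA, hmn, hgn] at heq
        exact heq.1.symm
      · have hchD : childrenD graph node ≠ [] := by
          simp [childrenD, PySem.Dict.getD_eq_get?_getD, hgn, hch]
        have hsome := hthird hmn hchD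
        have hwslen : ws.length ≤ graph.length := by
          have hsub : ws.map Prod.fst ⊆ graph.map Prod.fst := by
            intro x hx
            obtain ⟨p, hp, hp1⟩ := List.mem_map.mp hx
            exact hp1 ▸ (hwsp p hp).1
          have := (List.subperm_of_subset hwsnd hsub).length_le
          rw [List.length_map, List.length_map] at this
          exact this
        have hkF : k ≤ 1 + graph.length * (maxCh graph + 1) := by
          have hmul : ws.length * (maxCh graph + 1) ≤ graph.length * (maxCh graph + 1) :=
            Nat.mul_le_mul_right _ hwslen
          omega
        have hrun : loopB (1 + graph.length * (maxCh graph + 1)) [(node, true)] graph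
            (PySem.Dict.mk memo) = some m' := by
          have e : 1 + graph.length * (maxCh graph + 1)
              = k + (1 + graph.length * (maxCh graph + 1) - k) := by omega
          rw [e, hmach _ [], loopB_nil]
        show v = if ch = [] then 1 else
          match loopB (1 + graph.length * (maxCh graph + 1)) [(node, true)] graph
              (PySem.Dict.mk memo) with
          | some m' => m'.getD node 0
          | none => 0
        rw [if_neg hch, hrun]
        exact (PySem.Dict.getD_of_get?_eq_some m' 0 hsome).symm
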